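-- pv_equiv track=rewrite | github.com/oib/AITBC | scripts/monitor-prs.py | detect_ring
-- ===== SOURCE A (Python) =====
-- def detect_ring(path):
--     ring0 = ['packages/py/aitbc-core/', 'packages/py/aitbc-sdk/', 'packages/py/aitbc-agent-sdk/', 'packages/py/aitbc-crypto/']
--     ring1 = ['apps/coordinator-api/', 'apps/blockchain-node/', 'apps/analytics/', 'services/']
--     ring2 = ['cli/', 'scripts/', 'tools/']
--     ring3 = ['experiments/', 'playground/', 'prototypes/', 'examples/']
--     if any(path.startswith(p) for p in ring0):
--         return 0
--     if any(path.startswith(p) for p in ring1):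
--         return 1
--     if any(path.startswith(p) for p in ring2):
--         return 2
--     if any(path.startswith(p) for p in ring3):
--         return 3
--     return 2
-- ===== SOURCE B (Python) =====
-- _RING_BY_PREFIX = {
--     'packages/py/aitbc-core/': 0,
--     'packages/py/aitbc-sdk/': 0,
--     'packages/py/aitbc-agent-sdk/': 0,
--     'packages/py/aitbc-crypto/': 0,
--     'apps/coordinator-api/': 1,
--     'apps/blockchain-node/': 1,
--     'apps/analytics/': 1,
--     'services/': 1,
--     'cli/': 2,
--     'scripts/': 2,
--     'tools/': 2,
--     'experiments/': 3,
--     'playground/': 3,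
--     'prototypes/': 3,
--     'examples/': 3,
-- }
--
--
-- def detect_ring(path):
--     # Scan the path once; at each '/' hash-look-up the prefix accumulated so far.
--     # Correct because every table prefix ends in '/' and none is a prefix of another.
--     acc = ''
--     for ch in path:
--         acc += ch
--         if ch == '/':
--             ring = _RING_BY_PREFIX.get(acc)
--             if ring is not None:
--                 return ring
--     return 2
-- ===== Notes on version B (the rewrite author's own statement) =====
-- stated objective: alternative
-- what changed: Instead of testing the path against 15 known prefixes in four any() scans, B scans the path itself once and, at each '/', hash-looks-up the accumulated prefix in a dict keyed by prefix (correct because all table prefixes end in '/' and none is a prefix of another).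
import Mathlib
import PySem

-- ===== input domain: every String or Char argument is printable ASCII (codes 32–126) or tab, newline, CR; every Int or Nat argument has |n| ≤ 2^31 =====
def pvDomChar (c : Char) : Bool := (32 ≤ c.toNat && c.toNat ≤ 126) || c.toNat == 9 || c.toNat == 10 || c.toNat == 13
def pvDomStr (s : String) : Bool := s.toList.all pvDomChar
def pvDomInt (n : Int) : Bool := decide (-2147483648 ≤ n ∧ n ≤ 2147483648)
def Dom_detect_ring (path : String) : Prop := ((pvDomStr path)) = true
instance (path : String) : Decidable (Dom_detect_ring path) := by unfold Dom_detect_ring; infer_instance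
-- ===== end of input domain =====

-- B replaces A's four any() scans over 15 known prefixes by a single left-to-right scan of the
-- path itself, hash-looking-up the accumulated prefix in a dict at each '/' (alternative algorithm).

-- ===== PORT A =====
def detect_ring (path : String) : Int :=
  let ring0 := ["packages/py/aitbc-core/", "packages/py/aitbc-sdk/", "packages/py/aitbc-agent-sdk/", "packages/py/aitbc-crypto/"]
  let ring1 := ["apps/coordinator-api/", "apps/blockchain-node/", "apps/analytics/", "services/"]
  let ring2 := ["cli/", "scripts/", "tools/"]
  let ring3 := ["experiments/", "playground/", "prototypes/", "examples/"]
  if ring0.any (fun p => PySem.Str.startswith path p) then 0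
  else if ring1.any (fun p => PySem.Str.startswith path p) then 1
  else if ring2.any (fun p => PySem.Str.startswith path p) then 2
  else if ring3.any (fun p => PySem.Str.startswith path p) then 3
  else 2

-- ===== PORT B =====
-- _RING_BY_PREFIX: dict keyed by prefix
def ringDict : PySem.Dict String Int :=
  PySem.Dict.ofList
    [("packages/py/aitbc-core/", 0), ("packages/py/aitbc-sdk/", 0), ("packages/py/aitbc-agent-sdk/", 0), ("packages/py/aitbc-crypto/", 0),
     ("apps/coordinator-api/", 1), ("apps/blockchain-node/", 1), ("apps/analytics/", 1), ("services/", 1),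
     ("cli/", 2), ("scripts/", 2), ("tools/", 2),
     ("experiments/", 3), ("playground/", 3), ("prototypes/", 3), ("examples/", 3)]

-- the for-loop over the path's characters, accumulating `acc` and looking it up at each '/'
def ringScan (acc : String) : List Char → Int
  | [] => 2
  | c :: cs =>
    let acc' := acc.push c
    if c = '/' then
      match ringDict.get? acc' with
      | some r => r
      | none => ringScan acc' cs
    else ringScan acc' cs

def detect_ring_alt (path : String) : Int := ringScan "" path.toList

-- ===== PRECONDITION & SPEC =====
def Spec_detect_ring (path : String) (out : Int) : Prop := out = detect_ring_alt path
instance (path : String) (out : Int) : Decidable (Spec_detect_ring path out) := by unfold Spec_detect_ring; infer_instance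

-- ===== CLAIM (what is proved, stated in full; the proofs are below) =====
def Claim_equal_detect_ring : Prop := ∀ (path : String), Dom_detect_ring path → Spec_detect_ring path (detect_ring path)

-- ===== LEMMAS AND PROOFS =====

-- the flat (prefix, ring) table = ringDict.items
def tbl : List (String × Int) :=
  [("packages/py/aitbc-core/", 0), ("packages/py/aitbc-sdk/", 0), ("packages/py/aitbc-agent-sdk/", 0), ("packages/py/aitbc-crypto/", 0),
   ("apps/coordinator-api/", 1), ("apps/blockchain-node/", 1), ("apps/analytics/", 1), ("services/", 1),
   ("cli/", 2), ("scripts/", 2), ("tools/", 2),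
   ("experiments/", 3), ("playground/", 3), ("prototypes/", 3), ("examples/", 3)]

lemma ringDict_eq_mk : ringDict = PySem.Dict.mk tbl := by decide

-- proof-side view of A: first table entry whose prefix matches, else 2
def ringLoop : List (String × Int) → String → Int
  | [], _ => 2
  | (k, _r) :: t, path => if PySem.Str.startswith path k then _r else ringLoop t path

lemma sw_iff (path k : String) : PySem.Str.startswith path k = true ↔ k.toList <+: path.toList := by
  rw [PySem.Str.startswith_eq]; exact PySem.Chars.startswith_iff _ _

lemma sw_false (path k : String) (h : ¬ k.toList <+: path.toList) :
    PySem.Str.startswith path k = false := by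
  rw [Bool.eq_false_iff]; intro hT; exact h ((sw_iff path k).mp hT)

lemma dictGet_some_mem {ν : Type} (l : List (String × ν)) (k : String) (v : ν)
    (h : (PySem.Dict.mk l).get? k = some v) : (k, v) ∈ l := by
  induction l with
  | nil => simp [PySem.Dict.get?] at h
  | cons p t ih =>
    obtain ⟨k0, v0⟩ := p
    rw [PySem.Dict.get?_mk_cons] at h
    by_cases hk : k0 = k
    · subst hk
      simp at h
      subst h
      exact List.mem_cons_self
    · rw [if_neg (by simpa using hk)] at h
      exact List.mem_cons_of_mem _ (ih h)

lemma dictGet_none_not_mem {ν : Type} (l : List (String × ν)) (k : String)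
    (h : (PySem.Dict.mk l).get? k = none) : ∀ v, (k, v) ∉ l := by
  induction l with
  | nil => intro v hv; simp at hv
  | cons p t ih =>
    obtain ⟨k0, v0⟩ := p
    rw [PySem.Dict.get?_mk_cons] at h
    by_cases hk : k0 = k
    · subst hk; simp at h
    · rw [if_neg (by simpa using hk)] at h
      intro v hv
      rcases List.mem_cons.mp hv with heq | hm
      · exact hk (congrArg Prod.fst heq).symm
      · exact ih h v hm

-- table facts, checked by computation
lemma tbl_keys_slash : ∀ p ∈ tbl, p.1.toList.getLast? = some '/' := by decide
lemma tbl_pairwise : ∀ p ∈ tbl, ∀ q ∈ tbl, p.1 ≠ q.1 → ¬ (p.1.toList <+: q.1.toList) := by decide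
lemma tbl_nodup : (tbl.map Prod.fst).Nodup := by decide
lemma tbl_keys_ne_nil : ∀ p ∈ tbl, p.1.toList ≠ [] := by decide

lemma ringLoop_of_none (t : List (String × Int)) (path : String)
    (h : ∀ p ∈ t, ¬ (p.1.toList <+: path.toList)) : ringLoop t path = 2 := by
  induction t with
  | nil => rfl
  | cons p t ih =>
    obtain ⟨k, r⟩ := p
    unfold ringLoop
    rw [sw_false path k (h (k, r) List.mem_cons_self)]
    simp only [Bool.false_eq_true, if_false]
    exact ih (fun q hq => h q (List.mem_cons_of_mem _ hq))

lemma ringLoop_of_unique (t : List (String × Int)) (path : String) (k : String) (r : Int)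
    (hmem : (k, r) ∈ t) (hpre : k.toList <+: path.toList)
    (hothers : ∀ p ∈ t, p.1 ≠ k → ¬ (p.1.toList <+: path.toList))
    (hnd : (t.map Prod.fst).Nodup) : ringLoop t path = r := by
  induction t with
  | nil => cases hmem
  | cons p t ih =>
    obtain ⟨k0, r0⟩ := p
    unfold ringLoop
    by_cases hk : k0 = k
    · subst hk
      rw [(sw_iff path k0).mpr hpre]
      simp only [if_true]
      rcases List.mem_cons.mp hmem with heq | hm
      · exact (Prod.mk.injEq .. ▸ heq.symm).2
      · exfalso
        have : k0 ∈ t.map Prod.fst := List.mem_map.mpr ⟨(k0, r), hm, rfl⟩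
        exact (List.nodup_cons.mp (by simpa using hnd)).1 this
    · rw [sw_false path k0 (hothers (k0, r0) List.mem_cons_self hk)]
      simp only [Bool.false_eq_true, if_false]
      have hm : (k, r) ∈ t := by
        rcases List.mem_cons.mp hmem with heq | hm
        · exact absurd (congrArg Prod.fst heq).symm hk
        · exact hm
      exact ih hm (fun q hq hne => hothers q (List.mem_cons_of_mem _ hq) hne)
        (List.nodup_cons.mp (by simpa using hnd)).2

-- A's if-chain equals the first-match loop over the flat table
lemma A_eq_loop (path : String) : detect_ring path = ringLoop tbl path := by
  unfold detect_ring
  simp only [tbl, ringLoop, List.any_cons, List.any_nil, Bool.or_false]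
  generalize PySem.Str.startswith path "packages/py/aitbc-core/" = b0
  generalize PySem.Str.startswith path "packages/py/aitbc-sdk/" = b1
  generalize PySem.Str.startswith path "packages/py/aitbc-agent-sdk/" = b2
  generalize PySem.Str.startswith path "packages/py/aitbc-crypto/" = b3
  generalize PySem.Str.startswith path "apps/coordinator-api/" = b4
  generalize PySem.Str.startswith path "apps/blockchain-node/" = b5
  generalize PySem.Str.startswith path "apps/analytics/" = b6
  generalize PySem.Str.startswith path "services/" = b7
  generalize PySem.Str.startswith path "cli/" = b8
  generalize PySem.Str.startswith path "scripts/" = b9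
  generalize PySem.Str.startswith path "tools/" = b10
  generalize PySem.Str.startswith path "experiments/" = b11
  generalize PySem.Str.startswith path "playground/" = b12
  generalize PySem.Str.startswith path "prototypes/" = b13
  generalize PySem.Str.startswith path "examples/" = b14
  revert b0 b1 b2 b3 b4 b5 b6 b7 b8 b9 b10 b11 b12 b13 b14
  decide

-- main invariant: while no table key is a prefix of what has been consumed,
-- the scan of the rest equals the table loop on the whole path
lemma scan_eq (cs : List Char) : ∀ (acc : String),
    (∀ p ∈ tbl, ¬ (p.1.toList <+: acc.toList)) →
    ringScan acc cs = ringLoop tbl (String.ofList (acc.toList ++ cs)) := by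
  induction cs with
  | nil =>
    intro acc h
    unfold ringScan
    rw [List.append_nil, String.ofList_toList]
    exact (ringLoop_of_none tbl acc h).symm
  | cons c cs ih =>
    intro acc h
    unfold ringScan
    have hpush : (acc.push c).toList = acc.toList ++ [c] := String.toList_push c
    by_cases hc : c = '/'
    · subst hc
      rw [if_pos rfl]
      cases hg : ringDict.get? (acc.push '/') with
      | some r =>
        have hmem : (acc.push '/', r) ∈ tbl :=
          dictGet_some_mem tbl _ r (by rwa [ringDict_eq_mk] at hg)
        have hP : acc.toList ++ '/' :: cs = (acc.push '/').toList ++ cs := by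
          rw [hpush, List.append_assoc]; rfl
        have hpre : (acc.push '/').toList <+: (acc.toList ++ '/' :: cs) := by
          rw [hP]; exact ⟨cs, rfl⟩
        refine (ringLoop_of_unique tbl _ _ r hmem ?_ ?_ tbl_nodup).symm
        · rw [String.toList_ofList]; exact hpre
        · intro q hq hne hqpre
          rw [String.toList_ofList] at hqpre
          rcases List.prefix_or_prefix_of_prefix hqpre hpre with h1 | h2
          · exact tbl_pairwise q hq _ hmem hne h1
          · exact tbl_pairwise _ hmem q hq (Ne.symm hne) h2
      | none =>
        rw [show (acc.toList ++ '/' :: cs) = ((acc.push '/').toList ++ cs) by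
              rw [hpush, List.append_assoc]; rfl]
        refine ih (acc.push '/') ?_
        intro p hp hpre
        rw [hpush] at hpre
        rcases List.prefix_concat_iff.mp hpre with heq | hlt
        · have : p.1 = acc.push '/' := by
            apply String.toList_injective; rw [heq, hpush]
          exact dictGet_none_not_mem tbl _ (by rwa [ringDict_eq_mk] at hg) p.2
            (by rw [← this]; simpa using hp)
        · exact h p hp hlt
    · rw [if_neg hc,
          show (acc.toList ++ c :: cs) = ((acc.push c).toList ++ cs) by
            rw [hpush, List.append_assoc]; rfl]
      refine ih (acc.push c) ?_
      intro p hp hpre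
      rw [hpush] at hpre
      rcases List.prefix_concat_iff.mp hpre with heq | hlt
      · have : p.1.toList.getLast? = some c := by rw [heq]; simp
        rw [tbl_keys_slash p hp] at this
        exact hc (Option.some.injEq .. ▸ this).symm
      · exact h p hp hlt

-- ===== VERDICT (by name: the statement is the Claim_ definition above) =====
set_option maxHeartbeats 2000000 in
theorem detect_ring_spec : Claim_equal_detect_ring := by
  intro path _
  unfold Spec_detect_ring detect_ring_alt
  have h0 : ∀ p ∈ tbl, ¬ (p.1.toList <+: ("" : String).toList) := by
    intro p hp hpre
    exact tbl_keys_ne_nil p hp (List.prefix_nil.mp hpre)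
  rw [scan_eq path.toList "" h0]
  simpa [String.ofList_toList] using A_eq_loop path
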